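-- pv_equiv track=rewrite | github.com/iagomussel/chordImporter | chord_importer/core.py | _normalize_lyrics_text
-- ===== SOURCE A (Python) =====
-- def _normalize_lyrics_text(text: str) -> str:
--     """Normalize lyrics text: unify newlines, trim line-end spaces, collapse blanks."""
--     normalized = text.replace("\r\n", "\n").replace("\r", "\n")
--     lines = [line.rstrip() for line in normalized.split("\n")]
--     normalized_lines: list[str] = []
--     last_was_blank = False
--     for line in lines:
--         if line.strip() == "":
--             if not last_was_blank:
--                 normalized_lines.append("")
--             last_was_blank = True
--         else:
--             normalized_lines.append(line)
--             last_was_blank = False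
--     while normalized_lines and normalized_lines[0] == "":
--         normalized_lines.pop(0)
--     while normalized_lines and normalized_lines[-1] == "":
--         normalized_lines.pop()
--     return "\n".join(normalized_lines)
-- ===== SOURCE B (Python) =====
-- def _normalize_lyrics_text(text: str) -> str:
--     """Normalize lyrics text by grouping non-blank lines into paragraphs."""
--     paragraphs = []
--     current = []
--     for raw in text.replace("\r\n", "\n").replace("\r", "\n").split("\n"):
--         line = raw.rstrip()
--         if line:
--             current.append(line)
--         elif current:
--             paragraphs.append("\n".join(current))
--             current = []
--     if current:
--         paragraphs.append("\n".join(current))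
--     return "\n\n".join(paragraphs)
-- ===== Notes on version B (the rewrite author's own statement) =====
-- stated objective: simpler
-- what changed: Replaces A's stateful blank-flag collapse plus two edge-trimming while/pop loops with a single paragraph-grouping pass that collects runs of non-blank lines and joins the paragraphs with a blank-line separator, so collapsed blank lines are never materialised or trimmed.
import Mathlib
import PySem

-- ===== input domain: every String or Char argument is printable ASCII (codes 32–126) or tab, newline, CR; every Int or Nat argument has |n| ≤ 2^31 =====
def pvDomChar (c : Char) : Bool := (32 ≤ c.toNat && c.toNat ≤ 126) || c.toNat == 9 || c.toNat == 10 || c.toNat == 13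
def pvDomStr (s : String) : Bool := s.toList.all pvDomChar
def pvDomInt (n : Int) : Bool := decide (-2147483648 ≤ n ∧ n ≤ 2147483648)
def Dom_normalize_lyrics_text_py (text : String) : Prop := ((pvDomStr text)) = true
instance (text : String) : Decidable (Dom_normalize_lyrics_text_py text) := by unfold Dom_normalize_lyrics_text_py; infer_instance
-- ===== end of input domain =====

-- B replaces the stateful blank-flag collapse and the two edge-trimming while/pop
-- loops of A with a single paragraph-grouping pass over the lines (same cost, simpler).


-- ===== PORT A =====
def normalize_lyrics_text_py (text : String) : String :=
  let normalized := PySem.Str.replace (PySem.Str.replace text "\r\n" "\n") "\r" "\n"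
  -- sep "\n" ≠ "" so split? is always `some`; the getD default is never used
  let lines := ((PySem.Str.split? normalized "\n").getD []).map PySem.Str.rstrip
  let st := lines.foldl (fun (st : List String × Bool) line =>
      if PySem.Str.strip line = "" then
        ((if !st.2 then st.1 ++ [""] else st.1), true)
      else (st.1 ++ [line], false)) ([], false)
  -- the two while/pop loops remove exactly the leading and the trailing run of ""
  let nl := ((st.1.dropWhile (· = "")).reverse.dropWhile (· = "")).reverse
  PySem.Str.join "\n" nl

-- ===== PORT B =====
def normalize_lyrics_text_py_alt (text : String) : String :=
  let normalized := PySem.Str.replace (PySem.Str.replace text "\r\n" "\n") "\r" "\n"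
  let st := ((PySem.Str.split? normalized "\n").getD []).foldl
    (fun (st : List String × List String) raw =>
      let line := PySem.Str.rstrip raw
      if line ≠ "" then (st.1, st.2 ++ [line])
      else if st.2 ≠ [] then (st.1 ++ [PySem.Str.join "\n" st.2], []) else st)
    ([], [])
  let paragraphs := if st.2 ≠ [] then st.1 ++ [PySem.Str.join "\n" st.2] else st.1
  PySem.Str.join "\n\n" paragraphs

-- ===== PRECONDITION & SPEC =====
def Spec_normalize_lyrics_text_py (text : String) (out : String) : Prop := out = normalize_lyrics_text_py_alt text
instance (text : String) (out : String) : Decidable (Spec_normalize_lyrics_text_py text out) := by unfold Spec_normalize_lyrics_text_py; infer_instance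

-- ===== CLAIM (what is proved, stated in full; the proofs are below) =====
def Claim_equal_normalize_lyrics_text_py : Prop := ∀ (text : String), Dom_normalize_lyrics_text_py text → Spec_normalize_lyrics_text_py text (normalize_lyrics_text_py text)

-- ===== LEMMAS AND PROOFS =====

-- A's loop step, with the blank test already reduced to `line = ""` (valid on rstripped lines)
def pvStepA (st : List String × Bool) (line : String) : List String × Bool :=
  if line = "" then ((if !st.2 then st.1 ++ [""] else st.1), true) else (st.1 ++ [line], false)

-- B's loop step on an already-rstripped line
def pvStepB (st : List String × List String) (line : String) : List String × List String :=
  if line ≠ "" then (st.1, st.2 ++ [line])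
  else if st.2 ≠ [] then (st.1 ++ [PySem.Str.join "\n" st.2], []) else st

def pvLead (b : Bool) : List String := if b then [""] else []

-- the collapsed middle part of A's accumulator: paragraphs separated by one ""
def pvInter : List (List String) → List String
  | [] => []
  | [g] => g
  | g :: h :: t => g ++ [""] ++ pvInter (h :: t)

def pvGood (gs : List (List String)) : Prop := ∀ g ∈ gs, g ≠ [] ∧ ∀ s ∈ g, s ≠ ""

-- the joint reachable states of A's loop (acc, flag) and B's loop (paragraphs, current)
def pvInv (p : List String × Bool) (q : List String × List String) : Prop :=
  (p = ([], false) ∧ q = ([], []))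
  ∨ (p = ([""], true) ∧ q = ([], []))
  ∨ (∃ (lead : Bool) (gs₀ : List (List String)) (g : List String),
      pvGood (gs₀ ++ [g]) ∧ p = (pvLead lead ++ pvInter (gs₀ ++ [g]), false) ∧
      q = (gs₀.map (PySem.Str.join "\n"), g))
  ∨ (∃ (lead : Bool) (gs : List (List String)), gs ≠ [] ∧ pvGood gs ∧
      p = (pvLead lead ++ pvInter gs ++ [""], true) ∧
      q = (gs.map (PySem.Str.join "\n"), []))

lemma pvRstrip_nil_iff (c : List Char) :
    PySem.Chars.rstrip c = [] ↔ ∀ x ∈ c, PySem.Chars.isspace x = true := by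
  simp [PySem.Chars.rstrip, List.dropWhile_eq_nil_iff]

lemma pvAllsp_rstrip (c : List Char) (h : ∀ x ∈ PySem.Chars.rstrip c, PySem.Chars.isspace x = true) :
    PySem.Chars.rstrip c = [] := by
  unfold PySem.Chars.rstrip at *
  rcases hd : List.dropWhile PySem.Chars.isspace c.reverse with _ | ⟨y, ys⟩
  · simp
  · exfalso
    have hy : ¬ PySem.Chars.isspace y = true := by
      have := List.head?_dropWhile_not PySem.Chars.isspace c.reverse
      rw [hd] at this; simpa using this
    exact hy (h y (by simp [hd]))

lemma pvStrip_rstrip_nil_iff (t : String) :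
    (PySem.Str.strip (PySem.Str.rstrip t) = "") ↔ (PySem.Str.rstrip t = "") := by
  rw [← String.toList_inj, ← String.toList_inj]
  rw [PySem.Str.toList_strip, PySem.Str.toList_rstrip]
  show PySem.Chars.strip (PySem.Chars.rstrip t.toList) = [] ↔ _
  unfold PySem.Chars.strip
  constructor
  · intro h
    apply pvAllsp_rstrip
    intro x hx
    have h1 : ∀ x ∈ PySem.Chars.lstrip (PySem.Chars.rstrip t.toList), PySem.Chars.isspace x = true :=
      (pvRstrip_nil_iff _).mp h
    -- x is either in the dropped prefix (all isspace) or in lstrip's result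
    unfold PySem.Chars.lstrip at h1
    have hx' : x ∈ List.takeWhile PySem.Chars.isspace (PySem.Chars.rstrip t.toList) ++
        List.dropWhile PySem.Chars.isspace (PySem.Chars.rstrip t.toList) := by
      rw [List.takeWhile_append_dropWhile]; exact hx
    rcases List.mem_append.mp hx' with h2 | h2
    · exact List.mem_takeWhile_imp h2
    · exact h1 _ h2
  · intro h; rw [h]; simp [PySem.Chars.lstrip, PySem.Chars.rstrip]

lemma pvInter_append_singleton (gs : List (List String)) (g : List String) (h : gs ≠ []) :
    pvInter (gs ++ [g]) = pvInter gs ++ [""] ++ g := by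
  induction gs with
  | nil => simp at h
  | cons a t ih =>
    cases t with
    | nil => simp [pvInter]
    | cons b u =>
      have := ih (by simp)
      simp only [List.cons_append, pvInter] at *
      rw [this]; simp

lemma pvInter_snoc_last (gs₀ : List (List String)) (g : List String) (s : String) :
    pvInter (gs₀ ++ [g ++ [s]]) = pvInter (gs₀ ++ [g]) ++ [s] := by
  cases gs₀ with
  | nil => simp [pvInter]
  | cons a t =>
    rw [pvInter_append_singleton _ _ (by simp), pvInter_append_singleton _ _ (by simp)]
    simp

lemma pvInter_head (gs : List (List String)) (hg : pvGood gs) (h : gs ≠ []) :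
    ∃ x t, pvInter gs = x :: t ∧ x ≠ "" := by
  rcases gs with _ | ⟨a, t⟩
  · simp at h
  · obtain ⟨ha, hs⟩ := hg a (by simp)
    rcases a with _ | ⟨x, xs⟩
    · simp at ha
    · refine ⟨x, ?_, ?_, hs x (by simp)⟩
      · cases t with
        | nil => exact xs
        | cons b u => exact xs ++ [""] ++ pvInter (b :: u)
      · cases t with
        | nil => simp [pvInter]
        | cons b u => simp [pvInter]

lemma pvInter_last (gs : List (List String)) (hg : pvGood gs) (h : gs ≠ []) :
    ∃ x t, (pvInter gs).reverse = x :: t ∧ x ≠ "" := by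
  induction gs with
  | nil => simp at h
  | cons a t ih =>
    cases t with
    | nil =>
      obtain ⟨ha, hs⟩ := hg a (by simp)
      rcases hr : a.reverse with _ | ⟨y, ys⟩
      · simp_all
      · refine ⟨y, ys, by simp [pvInter, hr], hs y ?_⟩
        have : y ∈ a.reverse := by simp [hr]
        simpa using this
    | cons b u =>
      obtain ⟨y, ys, hy, hne⟩ := ih (fun g hgm => hg g (by simp [hgm])) (by simp)
      refine ⟨y, ys ++ ([""] ++ a.reverse), ?_, hne⟩
      simp only [pvInter, List.reverse_append, hy]
      simp

lemma pvStep_inv (p : List String × Bool) (q : List String × List String) (s : String)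
    (h : pvInv p q) : pvInv (pvStepA p s) (pvStepB q s) := by
  rcases h with ⟨hp, hq⟩ | ⟨hp, hq⟩ | ⟨lead, gs₀, g, hg, hp, hq⟩ | ⟨lead, gs, hgs, hg, hp, hq⟩ <;>
    subst hp hq <;> by_cases hs : s = ""
  · -- start, blank line
    refine Or.inr (Or.inl ⟨?_, ?_⟩) <;> simp [pvStepA, pvStepB, hs]
  · -- start, first non-blank line opens a paragraph
    refine Or.inr (Or.inr (Or.inl ⟨false, [], [s], ?_, ?_, ?_⟩))
    · intro g hgm; simp at hgm; subst hgm; exact ⟨by simp, by simpa using hs⟩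
    · simp [pvStepA, hs, pvLead, pvInter]
    · simp [pvStepB, hs]
  · -- only blanks so far, another blank line
    refine Or.inr (Or.inl ⟨?_, ?_⟩) <;> simp [pvStepA, pvStepB, hs]
  · -- only blanks so far, non-blank line opens a paragraph
    refine Or.inr (Or.inr (Or.inl ⟨true, [], [s], ?_, ?_, ?_⟩))
    · intro g hgm; simp at hgm; subst hgm; exact ⟨by simp, by simpa using hs⟩
    · simp [pvStepA, hs, pvLead, pvInter]
    · simp [pvStepB, hs]
  · -- open paragraph, blank line closes it
    have hgne : g ≠ [] := (hg g (by simp)).1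
    refine Or.inr (Or.inr (Or.inr ⟨lead, gs₀ ++ [g], by simp, hg, ?_, ?_⟩))
    · simp [pvStepA, hs, List.append_assoc]
    · simp [pvStepB, hs, hgne]
  · -- open paragraph, non-blank line extends it
    refine Or.inr (Or.inr (Or.inl ⟨lead, gs₀, g ++ [s], ?_, ?_, ?_⟩))
    · intro g' hgm
      rcases List.mem_append.mp hgm with h1 | h1
      · exact hg g' (by simp [h1])
      · simp at h1; subst h1
        refine ⟨by simp, ?_⟩
        intro x hx
        rcases List.mem_append.mp hx with h2 | h2
        · exact (hg g (by simp)).2 x h2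
        · simp at h2; subst h2; exact hs
    · simp [pvStepA, hs, pvInter_snoc_last, List.append_assoc]
    · simp [pvStepB, hs]
  · -- after a blank separator, another blank line changes nothing
    refine Or.inr (Or.inr (Or.inr ⟨lead, gs, hgs, hg, ?_, ?_⟩))
    · simp [pvStepA, hs]
    · simp [pvStepB, hs]
  · -- after a blank separator, non-blank line opens a new paragraph
    refine Or.inr (Or.inr (Or.inl ⟨lead, gs, [s], ?_, ?_, ?_⟩))
    · intro g' hgm
      rcases List.mem_append.mp hgm with h1 | h1
      · exact hg g' h1
      · simp at h1; subst h1; exact ⟨by simp, by simpa using hs⟩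
    · simp [pvStepA, hs, pvInter_append_singleton gs [s] hgs, List.append_assoc]
    · simp [pvStepB, hs]

lemma pvFold_inv (ls : List String) (p : List String × Bool) (q : List String × List String)
    (h : pvInv p q) : pvInv (ls.foldl pvStepA p) (ls.foldl pvStepB q) := by
  induction ls generalizing p q with
  | nil => exact h
  | cons x t ih => exact ih _ _ (pvStep_inv _ _ _ h)

lemma pvJoin_append (sep : List Char) (A B : List (List Char)) (hA : A ≠ []) (hB : B ≠ []) :
    PySem.Chars.join sep (A ++ B) = PySem.Chars.join sep A ++ sep ++ PySem.Chars.join sep B := by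
  induction A with
  | nil => simp at hA
  | cons a t ih =>
    cases t with
    | nil =>
      rcases B with _ | ⟨b, v⟩
      · simp at hB
      · rw [PySem.Chars.join_singleton]
        show PySem.Chars.join sep (a :: b :: v) = _
        rw [PySem.Chars.join_cons_cons]
    | cons c u =>
      have h1 := ih (by simp)
      have h2 : (a :: c :: u) ++ B = a :: ((c :: u) ++ B) := by simp
      rw [h2]
      have h3 : (c :: u) ++ B = c :: (u ++ B) := by simp
      rw [h3, PySem.Chars.join_cons_cons, ← h3, h1, PySem.Chars.join_cons_cons]
      simp

lemma pvInter_ne_nil (g : List String) (t : List (List String)) (hg : g ≠ []) :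
    pvInter (g :: t) ≠ [] := by
  cases t with
  | nil => exact hg
  | cons b u => simp [pvInter]

lemma pvJoinNN (gs : List (List String)) (hg : ∀ g ∈ gs, g ≠ []) :
    PySem.Str.join "\n" (pvInter gs) = PySem.Str.join "\n\n" (gs.map (PySem.Str.join "\n")) := by
  induction gs with
  | nil => rfl
  | cons a t ih =>
    cases t with
    | nil => simp [pvInter, PySem.Str.join]
    | cons b u =>
      apply String.toList_inj.mp
      rw [PySem.Str.toList_join, PySem.Str.toList_join]
      have ha : a ≠ [] := hg a (by simp)
      have hbu : ∀ g ∈ b :: u, g ≠ [] := fun g hgm => hg g (by simp [hgm])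
      have hIH := congrArg String.toList (ih hbu)
      rw [PySem.Str.toList_join, PySem.Str.toList_join] at hIH
      show PySem.Chars.join _ ((a ++ [""] ++ pvInter (b :: u)).map _) = _
      have hne : pvInter (b :: u) ≠ [] := pvInter_ne_nil b u (hg b (by simp))
      rw [List.map_append, List.map_append]
      rw [List.append_assoc]
      rw [pvJoin_append _ _ _ (by simpa using ha) (by simp)]
      rcases hI : (pvInter (b :: u)).map String.toList with _ | ⟨i0, irest⟩
      · simp_all
      · have h0 : ([""] : List String).map String.toList ++ (i0 :: irest) = [] :: i0 :: irest := by
          simp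
        rw [h0, PySem.Chars.join_cons_cons, ← hI, hIH]
        have hnl : ("\n\n".toList : List Char) = "\n".toList ++ "\n".toList := by decide
        simp only [List.map_cons, PySem.Chars.join_cons_cons, PySem.Str.toList_join, hnl,
          List.append_assoc, List.nil_append]

lemma pvTrim (lead : Bool) (m fp : List String)
    (hm : ∃ x t, m = x :: t ∧ x ≠ "") (hr : ∃ x t, m.reverse = x :: t ∧ x ≠ "")
    (hfp : fp = [] ∨ fp = [""]) :
    (((pvLead lead ++ m ++ fp).dropWhile (· = "")).reverse.dropWhile (· = "")).reverse = m := by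
  obtain ⟨x, t, hxt, hx⟩ := hm
  obtain ⟨y, u, hyu, hy⟩ := hr
  have h1 : (pvLead lead ++ m ++ fp).dropWhile (· = "") = m ++ fp := by
    cases lead <;> simp [pvLead, hxt, hx]
  rw [h1, List.reverse_append]
  have hd : m.reverse.dropWhile (· = "") = m.reverse := by
    rw [hyu]; simp [hy]
  rcases hfp with hfp | hfp <;> subst hfp
  · simp [hd]
  · simp [hd]

lemma pvFinish (p : List String × Bool) (q : List String × List String) (h : pvInv p q) :
    PySem.Str.join "\n" (((p.1.dropWhile (· = "")).reverse.dropWhile (· = "")).reverse)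
      = PySem.Str.join "\n\n" (if q.2 ≠ [] then q.1 ++ [PySem.Str.join "\n" q.2] else q.1) := by
  rcases h with ⟨hp, hq⟩ | ⟨hp, hq⟩ | ⟨lead, gs₀, g, hg, hp, hq⟩ | ⟨lead, gs, hgs, hg, hp, hq⟩ <;>
    subst hp hq
  · rfl
  · rfl
  · have hgne : g ≠ [] := (hg g (by simp)).1
    have hne : (gs₀ ++ [g] : List (List String)) ≠ [] := by simp
    simp only [hgne, ne_eq, not_false_eq_true, if_pos]
    have := pvTrim lead (pvInter (gs₀ ++ [g])) []
      (pvInter_head _ hg hne) (pvInter_last _ hg hne) (Or.inl rfl)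
    rw [List.append_nil] at this
    rw [this]
    have := pvJoinNN (gs₀ ++ [g]) (fun g' h' => (hg g' h').1)
    simpa using this
  · simp only [ne_eq, not_true_eq_false, if_neg, not_false_eq_true]
    rw [pvTrim lead (pvInter gs) [""] (pvInter_head _ hg hgs) (pvInter_last _ hg hgs) (Or.inr rfl)]
    exact pvJoinNN gs (fun g' h' => (hg g' h').1)

-- ===== VERDICT (by name: the statement is the Claim_ definition above) =====
theorem normalize_lyrics_text_py_spec : Claim_equal_normalize_lyrics_text_py := by
  intro text _
  unfold Spec_normalize_lyrics_text_py normalize_lyrics_text_py normalize_lyrics_text_py_alt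
  simp only []
  set raws := (PySem.Str.split? (PySem.Str.replace (PySem.Str.replace text "\r\n" "\n") "\r" "\n") "\n").getD [] with hraws
  -- B's fold over raw lines is the fold of pvStepB over the rstripped lines
  have hB : raws.foldl
      (fun (st : List String × List String) raw =>
        let line := PySem.Str.rstrip raw
        if line ≠ "" then (st.1, st.2 ++ [line])
        else if st.2 ≠ [] then (st.1 ++ [PySem.Str.join "\n" st.2], []) else st)
      ([], []) = (raws.map PySem.Str.rstrip).foldl pvStepB ([], []) := by
    rw [List.foldl_map]; rfl
  -- A's fold, with its blank test reduced on rstripped lines, is the fold of pvStepA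
  have hA : (raws.map PySem.Str.rstrip).foldl
      (fun (st : List String × Bool) line =>
        if PySem.Str.strip line = "" then ((if !st.2 then st.1 ++ [""] else st.1), true)
        else (st.1 ++ [line], false)) ([], false)
      = (raws.map PySem.Str.rstrip).foldl pvStepA ([], false) := by
    apply PySem.List.foldl_congr_mem
    intro acc x hx
    obtain ⟨raw, _, rfl⟩ := List.mem_map.mp hx
    unfold pvStepA
    exact if_congr (pvStrip_rstrip_nil_iff raw) rfl rfl
  rw [hB, hA]
  exact pvFinish _ _ (pvFold_inv _ _ _ (Or.inl ⟨rfl, rfl⟩))
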